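-- pv_equiv track=rewrite | github.com/Nacho-muro/QTM3 | appy2.py | obtener_estabilidad_politica
-- ===== SOURCE A (Python) =====
-- def obtener_estabilidad_politica(resultados_noticias_politicas):
--     if not resultados_noticias_politicas:
--         return "media"
--     positivas = sum(1 for r in resultados_noticias_politicas if r['sentimiento'] == 'POS')
--     negativas = sum(1 for r in resultados_noticias_politicas if r['sentimiento'] == 'NEG')
--     if positivas > negativas:
--         return "alta"
--     elif negativas > positivas:
--         return "baja"
--     else:
--         return "media"
-- ===== SOURCE B (Python) =====
-- _PUNTAJE = {'POS': 1, 'NEG': -1}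
--
-- def obtener_estabilidad_politica(resultados_noticias_politicas):
--     net = sum(_PUNTAJE.get(r['sentimiento'], 0) for r in resultados_noticias_politicas)
--     return "alta" if net > 0 else "baja" if net < 0 else "media"
-- ===== Notes on version B (the rewrite author's own statement) =====
-- stated objective: simpler
-- what changed: Replaces A's empty-list guard and two separate counting scans by a score-table lookup mapped over the rows and summed into one signed balance, classified by its sign.
import Mathlib
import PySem

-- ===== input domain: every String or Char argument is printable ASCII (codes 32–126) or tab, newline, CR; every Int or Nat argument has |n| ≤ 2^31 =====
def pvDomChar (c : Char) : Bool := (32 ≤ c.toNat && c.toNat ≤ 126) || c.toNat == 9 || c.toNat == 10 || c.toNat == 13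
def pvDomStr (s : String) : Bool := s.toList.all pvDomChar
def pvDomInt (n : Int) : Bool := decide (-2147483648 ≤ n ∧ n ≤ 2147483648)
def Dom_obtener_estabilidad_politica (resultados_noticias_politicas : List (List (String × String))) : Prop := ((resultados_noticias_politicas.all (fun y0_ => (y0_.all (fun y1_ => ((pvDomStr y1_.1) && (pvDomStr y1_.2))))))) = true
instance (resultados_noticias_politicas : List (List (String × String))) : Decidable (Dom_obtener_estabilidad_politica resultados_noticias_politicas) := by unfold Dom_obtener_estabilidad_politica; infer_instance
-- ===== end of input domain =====

-- B maps each row through a score table (POS→1, NEG→-1) and sums, classifying the sign of the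
-- balance; no empty-list guard and no separate counting scans. Same O(n) cost, plainer decomposition.


-- ===== PORT A =====
def obtener_estabilidad_politica (resultados_noticias_politicas : List (List (String × String))) : String :=
  if resultados_noticias_politicas = [] then "media"
  else
    let positivas : Int := resultados_noticias_politicas.foldl
      (fun acc r => if List.lookup "sentimiento" r = some "POS" then acc + 1 else acc) 0
    let negativas : Int := resultados_noticias_politicas.foldl
      (fun acc r => if List.lookup "sentimiento" r = some "NEG" then acc + 1 else acc) 0
    if positivas > negativas then "alta"
    else if negativas > positivas then "baja"
    else "media"

-- ===== PORT B =====
-- the module-level score table _PUNTAJE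
def pvPuntaje : PySem.Dict String Int := PySem.Dict.ofList [("POS", 1), ("NEG", -1)]

def obtener_estabilidad_politica_alt (resultados_noticias_politicas : List (List (String × String))) : String :=
  let net : Int :=
    (resultados_noticias_politicas.map
      (fun r => match List.lookup "sentimiento" r with
        | some s => PySem.Dict.getD pvPuntaje s 0
        | none => 0)).sum
  if 0 < net then "alta" else if net < 0 then "baja" else "media"

-- ===== PRECONDITION & SPEC =====
-- Pre_ excludes rows without a 'sentimiento' key, on which the Python A raises KeyError.
def Pre_obtener_estabilidad_politica (resultados_noticias_politicas : List (List (String × String))) : Prop :=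
  ∀ r ∈ resultados_noticias_politicas, (List.lookup "sentimiento" r).isSome
instance (resultados_noticias_politicas : List (List (String × String))) : Decidable (Pre_obtener_estabilidad_politica resultados_noticias_politicas) := by unfold Pre_obtener_estabilidad_politica; infer_instance

def pvWitness_obtener_estabilidad_politica : (List (List (String × String))) :=
  [[("sentimiento", "POS")], [("sentimiento", "NEU")]]

def Spec_obtener_estabilidad_politica (resultados_noticias_politicas : List (List (String × String))) (out : String) : Prop := out = obtener_estabilidad_politica_alt resultados_noticias_politicas
instance (resultados_noticias_politicas : List (List (String × String))) (out : String) : Decidable (Spec_obtener_estabilidad_politica resultados_noticias_politicas out) := by unfold Spec_obtener_estabilidad_politica; infer_instance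

-- ===== CLAIM (what is proved, stated in full; the proofs are below) =====
def Claim_equal_obtener_estabilidad_politica : Prop := ∀ (resultados_noticias_politicas : List (List (String × String))), Dom_obtener_estabilidad_politica resultados_noticias_politicas → Pre_obtener_estabilidad_politica resultados_noticias_politicas → Spec_obtener_estabilidad_politica resultados_noticias_politicas (obtener_estabilidad_politica resultados_noticias_politicas)

-- ===== LEMMAS AND PROOFS =====
-- B's summed score list equals A's positive count minus A's negative count (counts started at p, n).
theorem sum_scores_eq (rs : List (List (String × String))) (p n : Int) :
    p - n + (rs.map
      (fun r => match List.lookup "sentimiento" r with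
        | some s => PySem.Dict.getD pvPuntaje s 0
        | none => 0)).sum
    = rs.foldl (fun acc r => if List.lookup "sentimiento" r = some "POS" then acc + 1 else acc) p
      - rs.foldl (fun acc r => if List.lookup "sentimiento" r = some "NEG" then acc + 1 else acc) n := by
  induction rs generalizing p n with
  | nil => simp
  | cons r rs ih =>
    simp only [List.map_cons, List.sum_cons, List.foldl_cons]
    rcases h : List.lookup "sentimiento" r with _ | s
    · simp only [reduceCtorEq, if_false, zero_add]
      exact ih p n
    · by_cases hp : s = "POS"
      · subst hp
        simp only [Option.some.injEq, String.reduceEq, if_true, if_false]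
        have e : PySem.Dict.getD pvPuntaje "POS" 0 = 1 := by decide
        rw [e, ← ih (p + 1) n]; ring
      · by_cases hn : s = "NEG"
        · subst hn
          simp only [Option.some.injEq, String.reduceEq, if_true, if_false]
          have e : PySem.Dict.getD pvPuntaje "NEG" 0 = -1 := by decide
          rw [e, ← ih p (n + 1)]; ring
        · have e1 : ¬ (some s = some "POS") := by simp [hp]
          have e2 : ¬ (some s = some "NEG") := by simp [hn]
          have e3 : PySem.Dict.getD pvPuntaje s 0 = 0 := by
            have hd : pvPuntaje = PySem.Dict.mk [("POS", 1), ("NEG", -1)] := by decide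
            simp [PySem.Dict.getD, hd, (show ("POS":String) ≠ s from fun e => hp e.symm),
              (show ("NEG":String) ≠ s from fun e => hn e.symm), PySem.Dict.get?]
          simp only [if_neg e1, if_neg e2, e3]
          rw [← ih p n]; ring

-- ===== VERDICT (by name: the statement is the Claim_ definition above) =====
theorem obtener_estabilidad_politica_spec : Claim_equal_obtener_estabilidad_politica := by
  intro rs _ _
  unfold Spec_obtener_estabilidad_politica obtener_estabilidad_politica obtener_estabilidad_politica_alt
  rcases rs with _ | ⟨r, rs⟩
  · simp
  · simp only [if_neg (List.cons_ne_nil r rs)]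
    have h := sum_scores_eq (r :: rs) 0 0
    simp only [sub_zero, zero_add] at h
    rw [h]
    set P := (r :: rs).foldl (fun acc r => if List.lookup "sentimiento" r = some "POS" then acc + 1 else acc) (0:Int)
    set N := (r :: rs).foldl (fun acc r => if List.lookup "sentimiento" r = some "NEG" then acc + 1 else acc) (0:Int)
    by_cases h1 : P > N
    · rw [if_pos h1, if_pos (show 0 < P - N by omega)]
    · rw [if_neg h1, if_neg (show ¬ 0 < P - N by omega)]
      by_cases h2 : N > P
      · rw [if_pos h2, if_pos (show P - N < 0 by omega)]
      · rw [if_neg h2, if_neg (show ¬ P - N < 0 by omega)]
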